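-- pv_equiv track=rewrite | github.com/RuchitaD1/Assignment2-IR | tokenize.py | gammaCode
-- ===== SOURCE A (Python) =====
-- def binaryString(n):
--     return str(bin(n))[2:]
--
-- def gammaCode(n):
--     unary=binaryString(n)
--     compressed=''
--     i=1
--     while(i<len(unary)):
--         compressed+='1'
--         i+=1
--
--     compressed+='0'+unary[1:]
--     return bin(int(compressed,2))
-- ===== SOURCE B (Python) =====
-- def gammaCode(n):
--     unary = bin(n)[2:]
--     L = len(unary)
--     value = (2 ** (L - 1) - 1) * 2 ** L + int(unary[1:] or '0', 2)
--     return bin(value)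
-- ===== Notes on version B (the rewrite author's own statement) =====
-- stated objective: simpler
-- what changed: Replaces the while-loop that builds a string of ones character by character and the concatenate-then-reparse of the whole compressed string with a closed-form arithmetic computation of the same value from the length of the binary string and the parsed low bits.
import Mathlib
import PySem

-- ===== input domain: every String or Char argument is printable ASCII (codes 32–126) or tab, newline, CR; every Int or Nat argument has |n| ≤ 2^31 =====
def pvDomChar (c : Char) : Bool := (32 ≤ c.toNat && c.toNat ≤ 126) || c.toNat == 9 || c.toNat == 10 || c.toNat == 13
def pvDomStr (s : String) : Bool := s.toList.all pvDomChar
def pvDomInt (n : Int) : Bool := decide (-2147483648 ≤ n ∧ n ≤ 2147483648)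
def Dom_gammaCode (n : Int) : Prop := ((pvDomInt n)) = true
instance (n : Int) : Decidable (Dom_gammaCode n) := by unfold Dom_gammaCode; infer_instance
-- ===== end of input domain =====

-- B replaces A's character-by-character '1'-loop and concatenate-then-reparse with a
-- closed-form arithmetic computation of the same value (objective: simpler).

-- ===== PORT A =====

-- binary digits of a natural number, most significant first (bin(n) without the '0b'; [] for 0)
def binDigits : Nat → List Char
  | 0 => []
  | (m+1) => binDigits ((m+1)/2) ++ [if (m+1) % 2 = 1 then '1' else '0']
decreasing_by exact Nat.div_lt_self (Nat.succ_pos m) (by norm_num)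

def binStr (m : Nat) : List Char := if m = 0 then ['0'] else binDigits m

-- Python's bin(n): '0b'+digits, '-0b'+digits for negatives, '0b0' for 0 (exact)
def pyBin (n : Int) : String :=
  if n < 0 then String.ofList ('-' :: '0' :: 'b' :: binStr n.natAbs)
  else String.ofList ('0' :: 'b' :: binStr n.natAbs)

-- int(s, 2): none on a non-binary character (Python raises ValueError there).
-- (Python also raises on the empty string; both ports only ever parse nonempty strings.)
def parseBin? (cs : List Char) : Option Nat :=
  cs.foldl (fun o c => o.bind fun a =>
    if c = '0' then some (2*a) else if c = '1' then some (2*a+1) else none) (some 0)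

-- the while loop: while i < len(unary): compressed += '1'; i += 1
def gammaLoop (acc : List Char) (i : Nat) (unary : List Char) : List Char :=
  if i < unary.length then gammaLoop (acc ++ ['1']) (i+1) unary else acc
termination_by unary.length - i
decreasing_by omega

def gammaCode (n : Int) : String :=
  let unary := (pyBin n).toList.drop 2        -- binaryString(n) = str(bin(n))[2:]
  let compressed := gammaLoop [] 1 unary
  let compressed := compressed ++ '0' :: unary.drop 1
  match parseBin? compressed with
  | some v => pyBin (v : Int)
  | none => ""                                 -- ValueError; unreachable (compressed is always binary)

-- ===== PORT B =====

def gammaCode_alt (n : Int) : String :=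
  let unary := (pyBin n).toList.drop 2
  let L := unary.length
  let tail := unary.drop 1
  let low := (parseBin? (if tail = [] then ['0'] else tail)).getD 0  -- int(unary[1:] or '0', 2); always succeeds here
  pyBin (((2:Int)^(L-1) - 1) * 2^L + (low : Int))

-- ===== PRECONDITION & SPEC =====
def Spec_gammaCode (n : Int) (out : String) : Prop := out = gammaCode_alt n
instance (n : Int) (out : String) : Decidable (Spec_gammaCode n out) := by unfold Spec_gammaCode; infer_instance

-- ===== CLAIM (what is proved, stated in full; the proofs are below) =====
def Claim_equal_gammaCode : Prop := ∀ (n : Int), Dom_gammaCode n → Spec_gammaCode n (gammaCode n)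

-- ===== LEMMAS AND PROOFS =====

def binDigitVal (c : Char) : Nat := if c = '1' then 1 else 0

def pvalAux (a : Nat) (cs : List Char) : Nat := cs.foldl (fun a c => 2*a + binDigitVal c) a

theorem pvalAux_cons (a : Nat) (c : Char) (cs : List Char) :
    pvalAux a (c :: cs) = pvalAux (2*a + binDigitVal c) cs := by
  simp [pvalAux]

theorem pvalAux_append (a : Nat) (xs ys : List Char) :
    pvalAux a (xs ++ ys) = pvalAux (pvalAux a xs) ys := by
  simp [pvalAux, List.foldl_append]

theorem pvalAux_eq (cs : List Char) : ∀ a, pvalAux a cs = a * 2^cs.length + pvalAux 0 cs := by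
  induction cs with
  | nil => simp [pvalAux]
  | cons c cs ih =>
      intro a
      rw [pvalAux_cons, pvalAux_cons, ih, ih (2*0 + binDigitVal c)]
      simp [List.length_cons]
      ring

theorem parseBin_go (cs : List Char) : ∀ a, (∀ c ∈ cs, c = '0' ∨ c = '1') →
    List.foldl (fun o c => o.bind fun a =>
      if c = '0' then some (2*a) else if c = '1' then some (2*a+1) else none) (some a) cs
    = some (pvalAux a cs) := by
  induction cs with
  | nil => intro a _; simp [pvalAux]
  | cons c cs ih =>
      intro a h
      rcases h c (by simp) with hc | hc <;>
        simp [hc, List.foldl_cons, pvalAux_cons, binDigitVal,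
          ih _ (fun d hd => h d (by simp [hd]))]

theorem parseBin_eq (cs : List Char) (h : ∀ c ∈ cs, c = '0' ∨ c = '1') :
    parseBin? cs = some (pvalAux 0 cs) := parseBin_go cs 0 h

theorem pval_replicate (k : Nat) : pvalAux 0 (List.replicate k '1') = 2^k - 1 := by
  induction k with
  | zero => simp [pvalAux]
  | succ k ih =>
      rw [List.replicate_succ, pvalAux_cons, pvalAux_eq, ih]
      have : 1 ≤ 2^k := Nat.one_le_two_pow
      simp [binDigitVal, List.length_replicate]
      omega

theorem gammaLoop_eq (u : List Char) : ∀ (k i : Nat) (acc : List Char), u.length - i = k →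
    gammaLoop acc i u = acc ++ List.replicate k '1' := by
  intro k
  induction k with
  | zero =>
      intro i acc h
      rw [gammaLoop]
      simp only [if_neg (by omega : ¬ i < u.length)]
      simp
  | succ k ih =>
      intro i acc h
      rw [gammaLoop]
      simp only [if_pos (by omega : i < u.length)]
      rw [ih (i+1) (acc ++ ['1']) (by omega)]
      simp [List.replicate_succ]

theorem binDigits_binary : ∀ m, ∀ c ∈ binDigits m, c = '0' ∨ c = '1' := by
  intro m
  induction m using Nat.strong_induction_on with
  | _ m ih =>
      match m with
      | 0 => simp [binDigits]
      | (k+1) =>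
          rw [binDigits]
          intro c hc
          rcases List.mem_append.mp hc with h | h
          · exact ih ((k+1)/2) (Nat.div_lt_self (Nat.succ_pos k) (by norm_num)) c h
          · simp at h; split at h <;> simp [h]

theorem binStr_binary (m : Nat) : ∀ c ∈ binStr m, c = '0' ∨ c = '1' := by
  unfold binStr
  split
  · simp
  · exact binDigits_binary m

theorem binStr_ne_nil (m : Nat) : binStr m ≠ [] := by
  unfold binStr
  split
  · simp
  · rename_i h
    match m, h with
    | (k+1), _ => rw [binDigits]; simp

-- the core identity, over an arbitrary nonempty unary string with binary tail
theorem gamma_key (u : List Char) (hne : u ≠ [])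
    (ht : ∀ c ∈ u.drop 1, c = '0' ∨ c = '1') :
    (match parseBin? (gammaLoop [] 1 u ++ '0' :: u.drop 1) with
     | some v => pyBin (v : Int)
     | none => "")
    = pyBin (((2:Int)^(u.length-1) - 1) * 2^u.length
        + (((parseBin? (if u.drop 1 = [] then ['0'] else u.drop 1)).getD 0 : Nat) : Int)) := by
  have hL : 1 ≤ u.length := by
    cases u with | nil => exact absurd rfl hne | cons c cs => simp
  have htlen : (u.drop 1).length = u.length - 1 := by simp
  rw [gammaLoop_eq u (u.length - 1) 1 [] rfl]
  have hbin : ∀ c ∈ (List.replicate (u.length - 1) '1' : List Char) ++ '0' :: u.drop 1,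
      c = '0' ∨ c = '1' := by
    intro c hc
    rcases List.mem_append.mp hc with h | h
    · exact Or.inr (List.eq_of_mem_replicate h)
    · rcases List.mem_cons.mp h with h | h
      · exact Or.inl h
      · exact ht c h
  rw [List.nil_append, parseBin_eq _ hbin]
  -- value of the compressed string
  have hval : pvalAux 0 (List.replicate (u.length - 1) '1' ++ '0' :: u.drop 1)
      = (2^(u.length - 1) - 1) * 2^u.length + pvalAux 0 (u.drop 1) := by
    rw [pvalAux_append, pvalAux_eq, pval_replicate]
    have : ('0' :: u.drop 1).length = u.length := by simp; omega
    rw [pvalAux_cons]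
    simp [binDigitVal]
    omega
  -- the low part of B
  have hlow : (parseBin? (if u.drop 1 = [] then ['0'] else u.drop 1)).getD 0
      = pvalAux 0 (u.drop 1) := by
    split
    · rename_i h
      rw [h, parseBin_eq ['0'] (by simp)]
      simp [pvalAux, binDigitVal]
    · rw [parseBin_eq _ ht]; rfl
  rw [hval, hlow]
  simp only []
  congr 1
  have h1 : (1:Nat) ≤ 2^(u.length - 1) := Nat.one_le_two_pow
  push_cast [Nat.cast_sub h1]
  ring

theorem unary_tail_binary (n : Int) :
    ∀ c ∈ ((pyBin n).toList.drop 2).drop 1, c = '0' ∨ c = '1' := by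
  unfold pyBin
  split
  · simp only [String.toList_ofList, List.drop]
    exact binStr_binary n.natAbs
  · simp only [String.toList_ofList, List.drop]
    intro c hc
    exact binStr_binary n.natAbs c (List.mem_of_mem_drop hc)

theorem unary_ne_nil (n : Int) : (pyBin n).toList.drop 2 ≠ [] := by
  unfold pyBin
  split
  · simp only [String.toList_ofList, List.drop]
    simp
  · simp only [String.toList_ofList, List.drop]
    exact binStr_ne_nil n.natAbs

-- ===== VERDICT (by name: the statement is the Claim_ definition above) =====
theorem gammaCode_spec : Claim_equal_gammaCode := by
  intro n _
  unfold Spec_gammaCode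
  simp only [gammaCode, gammaCode_alt]
  exact (gamma_key ((pyBin n).toList.drop 2) (unary_ne_nil n) (unary_tail_binary n))
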